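-- pv_equiv track=rewrite | github.com/browndw/docuscope-cac | lib/docuscope/_streamlit/utilities/analysis_functions.py | split_corpus
-- ===== SOURCE A (Python) =====
-- def split_corpus(tok, tar_list, ref_list):
-- 	tar_docs = {key: value for key, value in tok.items() if key.startswith(tuple(tar_list))}
-- 	ref_docs = {key: value for key, value in tok.items() if key.startswith(tuple(ref_list))}
-- 	tar_ndocs = len(tar_docs)
-- 	ref_ndocs = len(ref_docs)
-- 	#get target counts
-- 	tar_tok = list(tar_docs.values())
-- 	tar_tags = []
-- 	for i in range(0,len(tar_tok)):
-- 		tags = [x[1] for x in tar_tok[i]]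
-- 		tar_tags.append(tags)
-- 	tar_tags = [x for xs in tar_tags for x in xs]
-- 	tar_tokens = len(tar_tags)
-- 	tar_words = len([x for x in tar_tags if not x.startswith('Y')])
--
-- 	#get reference counts
-- 	ref_tok = list(ref_docs.values())
-- 	ref_tags = []
-- 	for i in range(0,len(ref_tok)):
-- 		tags = [x[1] for x in ref_tok[i]]
-- 		ref_tags.append(tags)
-- 	ref_tags = [x for xs in ref_tags for x in xs]
-- 	ref_tokens = len(ref_tags)
-- 	ref_words = len([x for x in ref_tags if not x.startswith('Y')])
-- 	return tar_docs, ref_docs, tar_words, ref_words, tar_tokens, ref_tokens, tar_ndocs, ref_ndocs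
-- ===== SOURCE B (Python) =====
-- def split_corpus(tok, tar_list, ref_list):
--     tar_pre = tuple(tar_list)
--     ref_pre = tuple(ref_list)
--     tar_docs = {}
--     ref_docs = {}
--     tar_tokens = tar_words = ref_tokens = ref_words = 0
--     for key, doc in tok.items():
--         in_tar = key.startswith(tar_pre)
--         in_ref = key.startswith(ref_pre)
--         if in_tar or in_ref:
--             t = len(doc)
--             w = t - sum(1 for x in doc if x[1].startswith('Y'))
--             if in_tar:
--                 tar_docs[key] = doc
--                 tar_tokens += t
--                 tar_words += w
--             if in_ref:
--                 ref_docs[key] = doc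
--                 ref_tokens += t
--                 ref_words += w
--     return (tar_docs, ref_docs, tar_words, ref_words,
--             tar_tokens, ref_tokens, len(tar_docs), len(ref_docs))
-- ===== Notes on version B (the rewrite author's own statement) =====
-- stated objective: alternative
-- what changed: Replaces A's two dict-comprehension filter passes followed by two build/flatten/filtered-len counting pipelines with ONE fused pass over the corpus that classifies each document once, computes its token count and word count (tokens minus Y-tag count) a single time, and adds it to the target and/or reference accumulators in place; the single traversal with no intermediate tag lists is the constant-factor speed mechanism.
import Mathlib
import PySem

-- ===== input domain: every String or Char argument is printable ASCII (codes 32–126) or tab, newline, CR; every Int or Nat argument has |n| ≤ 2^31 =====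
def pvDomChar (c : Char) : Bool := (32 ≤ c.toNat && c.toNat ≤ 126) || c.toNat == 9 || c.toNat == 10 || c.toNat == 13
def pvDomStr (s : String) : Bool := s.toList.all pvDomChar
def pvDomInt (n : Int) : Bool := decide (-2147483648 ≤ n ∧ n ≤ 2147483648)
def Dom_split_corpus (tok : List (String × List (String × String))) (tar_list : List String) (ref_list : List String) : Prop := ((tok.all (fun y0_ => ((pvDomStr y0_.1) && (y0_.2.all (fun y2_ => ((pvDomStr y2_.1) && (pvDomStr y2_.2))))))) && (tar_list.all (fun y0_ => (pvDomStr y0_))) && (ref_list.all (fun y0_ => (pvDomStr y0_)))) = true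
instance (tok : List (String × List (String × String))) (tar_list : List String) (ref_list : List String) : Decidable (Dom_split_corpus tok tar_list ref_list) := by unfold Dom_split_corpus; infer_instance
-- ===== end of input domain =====

-- B fuses A's four corpus traversals (two filters, two flatten/count pipelines) into one pass
-- that classifies each document once and accumulates its counts (objective: alternative).

-- ===== PORT A =====
-- key.startswith(tuple(lst)): true iff some element of lst is a prefix (False for empty tuple)
def pvStartsAny (key : String) (lst : List String) : Bool :=
  lst.any (fun p => PySem.Str.startswith key p)

def split_corpus (tok : List (String × List (String × String))) (tar_list : List String) (ref_list : List String) : (List (String × List (String × String))) × (List (String × List (String × String))) × Int × Int × Int × Int × Int × Int :=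
  let tar_docs := tok.filter (fun kv => pvStartsAny kv.1 tar_list)
  let ref_docs := tok.filter (fun kv => pvStartsAny kv.1 ref_list)
  let tar_ndocs : Int := tar_docs.length
  let ref_ndocs : Int := ref_docs.length
  -- target counts
  let tar_tok := tar_docs.map (·.2)
  let tar_tags_ll := tar_tok.foldl (fun acc doc => acc ++ [doc.map (·.2)]) []
  let tar_tags := tar_tags_ll.foldl (fun acc xs => acc ++ xs) []   -- [x for xs in … for x in xs]
  let tar_tokens : Int := tar_tags.length
  let tar_words : Int := (tar_tags.filter (fun x => !(PySem.Str.startswith x "Y"))).length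
  -- reference counts
  let ref_tok := ref_docs.map (·.2)
  let ref_tags_ll := ref_tok.foldl (fun acc doc => acc ++ [doc.map (·.2)]) []
  let ref_tags := ref_tags_ll.foldl (fun acc xs => acc ++ xs) []
  let ref_tokens : Int := ref_tags.length
  let ref_words : Int := (ref_tags.filter (fun x => !(PySem.Str.startswith x "Y"))).length
  (tar_docs, ref_docs, tar_words, ref_words, tar_tokens, ref_tokens, tar_ndocs, ref_ndocs)

-- ===== PORT B =====
-- state: (tar_docs, ref_docs, tar_tokens, tar_words, ref_tokens, ref_words)
def pvState := (List (String × List (String × String))) × (List (String × List (String × String))) × Int × Int × Int × Int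

def pvStep (tar_list ref_list : List String) (st : pvState) (kv : String × List (String × String)) : pvState :=
  let in_tar := tar_list.any (fun p => PySem.Str.startswith kv.1 p)
  let in_ref := ref_list.any (fun p => PySem.Str.startswith kv.1 p)
  if in_tar || in_ref then
    let t : Int := kv.2.length
    let y : Int := kv.2.foldl (fun s x => if PySem.Str.startswith x.2 "Y" then s + 1 else s) 0
    let w : Int := t - y
    let st1 : pvState :=
      if in_tar then (st.1 ++ [kv], st.2.1, st.2.2.1 + t, st.2.2.2.1 + w, st.2.2.2.2.1, st.2.2.2.2.2)
      else st
    if in_ref then (st1.1, st1.2.1 ++ [kv], st1.2.2.1, st1.2.2.2.1, st1.2.2.2.2.1 + t, st1.2.2.2.2.2 + w)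
    else st1
  else st

def split_corpus_alt (tok : List (String × List (String × String))) (tar_list : List String) (ref_list : List String) : (List (String × List (String × String))) × (List (String × List (String × String))) × Int × Int × Int × Int × Int × Int :=
  let st := tok.foldl (pvStep tar_list ref_list) ([], [], 0, 0, 0, 0)
  (st.1, st.2.1, st.2.2.2.1, st.2.2.2.2.2, st.2.2.1, st.2.2.2.2.1,
   (st.1.length : Int), (st.2.1.length : Int))

-- ===== PRECONDITION & SPEC =====
def Spec_split_corpus (tok : List (String × List (String × String))) (tar_list : List String) (ref_list : List String) (out : (List (String × List (String × String))) × (List (String × List (String × String))) × Int × Int × Int × Int × Int × Int) : Prop := out = split_corpus_alt tok tar_list ref_list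
instance (tok : List (String × List (String × String))) (tar_list : List String) (ref_list : List String) (out : (List (String × List (String × String))) × (List (String × List (String × String))) × Int × Int × Int × Int × Int × Int) : Decidable (Spec_split_corpus tok tar_list ref_list out) := by
  unfold Spec_split_corpus
  haveI h0 : DecidableEq (Int × Int) := inferInstance
  haveI h1 : DecidableEq (Int × Int × Int) := @instDecidableEqProd _ _ _ h0
  haveI h2 : DecidableEq (Int × Int × Int × Int) := @instDecidableEqProd _ _ _ h1
  haveI h3 : DecidableEq (Int × Int × Int × Int × Int) := @instDecidableEqProd _ _ _ h2
  haveI h4 : DecidableEq (Int × Int × Int × Int × Int × Int) := @instDecidableEqProd _ _ _ h3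
  haveI h5 : DecidableEq ((List (String × List (String × String))) × Int × Int × Int × Int × Int × Int) := @instDecidableEqProd _ _ _ h4
  haveI h6 : DecidableEq ((List (String × List (String × String))) × (List (String × List (String × String))) × Int × Int × Int × Int × Int × Int) := @instDecidableEqProd _ _ _ h5
  exact h6 _ _

-- ===== CLAIM (what is proved, stated in full; the proofs are below) =====
def Claim_equal_split_corpus : Prop := ∀ (tok : List (String × List (String × String))) (tar_list : List String) (ref_list : List String), Dom_split_corpus tok tar_list ref_list → Spec_split_corpus tok tar_list ref_list (split_corpus tok tar_list ref_list)

-- ===== LEMMAS AND PROOFS =====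

theorem pvFilterSplit {α : Type} (l : List α) (p : α → Bool) :
    l.length = (l.filter p).length + (l.filter (fun x => !(p x))).length := by
  induction l with
  | nil => simp
  | cons x xs ih => cases h : p x <;> simp [List.filter_cons, h, ih] <;> omega

-- per-document counts that the fused pass accumulates
def pvTokC (doc : List (String × String)) : Int := doc.length
def pvWordC (doc : List (String × String)) : Int :=
  pvTokC doc - doc.foldl (fun s x => if PySem.Str.startswith x.2 "Y" then s + 1 else s) 0

theorem pvYfold (doc : List (String × String)) (s : Int) :
    doc.foldl (fun s x => if PySem.Str.startswith x.2 "Y" then s + 1 else s) s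
      = s + ((doc.map (·.2)).filter (fun x => PySem.Str.startswith x "Y")).length := by
  induction doc generalizing s with
  | nil => simp
  | cons x xs ih =>
    simp only [List.foldl_cons, List.map_cons, List.filter_cons, ih]
    cases h : PySem.Str.startswith x.2 "Y" <;> simp [h] <;> push_cast <;> ring

theorem pvWordC_eq (doc : List (String × String)) :
    pvWordC doc = ((doc.map (·.2)).filter (fun x => !(PySem.Str.startswith x "Y"))).length := by
  unfold pvWordC pvTokC
  rw [pvYfold]
  have h := pvFilterSplit (doc.map (·.2)) (fun x => PySem.Str.startswith x "Y")
  simp at h ⊢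
  omega

def pvSum (docs : List (String × List (String × String))) (f : List (String × String) → Int) : Int :=
  (docs.map (fun kv => f kv.2)).sum

-- invariant of the fused fold
theorem pvFold_inv (tar_list ref_list : List String)
    (tok : List (String × List (String × String))) (st : pvState) :
    tok.foldl (pvStep tar_list ref_list) st
      = (st.1 ++ tok.filter (fun kv => pvStartsAny kv.1 tar_list),
         st.2.1 ++ tok.filter (fun kv => pvStartsAny kv.1 ref_list),
         st.2.2.1 + pvSum (tok.filter (fun kv => pvStartsAny kv.1 tar_list)) pvTokC,
         st.2.2.2.1 + pvSum (tok.filter (fun kv => pvStartsAny kv.1 tar_list)) pvWordC,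
         st.2.2.2.2.1 + pvSum (tok.filter (fun kv => pvStartsAny kv.1 ref_list)) pvTokC,
         st.2.2.2.2.2 + pvSum (tok.filter (fun kv => pvStartsAny kv.1 ref_list)) pvWordC) := by
  induction tok generalizing st with
  | nil => simp [pvSum]
  | cons kv tok ih =>
    obtain ⟨A, B, a, b, c, d⟩ := st
    simp only [List.foldl_cons, ih, List.filter_cons]
    unfold pvStep pvStartsAny
    cases ht : List.any tar_list (fun p => PySem.Str.startswith kv.1 p) <;>
    cases hr : List.any ref_list (fun p => PySem.Str.startswith kv.1 p) <;>
      simp [ht, hr, pvSum, pvWordC, pvTokC, add_assoc]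

theorem foldl_append_eq_flatten' {α : Type} (l : List (List α)) (acc : List α) :
    l.foldl (fun acc xs => acc ++ xs) acc = acc ++ l.flatten := by
  induction l generalizing acc with
  | nil => simp
  | cons x xs ih => simp [ih]

theorem foldl_singleton_append' {α β : Type} (f : α → β) (l : List α) (acc : List β) :
    l.foldl (fun acc x => acc ++ [f x]) acc = acc ++ l.map f := by
  induction l generalizing acc with
  | nil => simp
  | cons x xs ih => simp [ih]

-- A's flatten/length pipeline equals the per-doc sums B accumulates
theorem pvTokens_eq (docs : List (String × List (String × String))) :
    (((docs.map (·.2)).map (fun d => d.map (·.2))).flatten.length : Int)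
      = pvSum docs pvTokC := by
  induction docs with
  | nil => simp [pvSum]
  | cons kv ds ih => simp [pvSum, pvTokC, List.map_cons] at ih ⊢; push_cast; omega

theorem pvWords_eq (docs : List (String × List (String × String))) :
    ((((docs.map (·.2)).map (fun d => d.map (·.2))).flatten.filter
        (fun x => !(PySem.Str.startswith x "Y"))).length : Int)
      = pvSum docs pvWordC := by
  induction docs with
  | nil => simp [pvSum]
  | cons kv ds ih =>
    simp only [List.map_cons, List.flatten_cons, List.filter_append, List.length_append]
    simp only [pvSum, List.map_cons, List.sum_cons] at ih ⊢
    rw [pvWordC_eq]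
    push_cast
    omega

-- ===== VERDICT (by name: the statement is the Claim_ definition above) =====
theorem split_corpus_spec : Claim_equal_split_corpus := by
  intro tok tar_list ref_list _
  unfold Spec_split_corpus split_corpus split_corpus_alt
  rw [pvFold_inv]
  simp only [foldl_singleton_append', List.nil_append, foldl_append_eq_flatten',
    pvTokens_eq, pvWords_eq, zero_add]
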